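-- pv_equiv track=rewrite | github.com/gibsramen/spaced-motif-finding | src/gibs_gappedMotif.py | scoreMotifs
-- ===== SOURCE A (Python) =====
-- def scoreMotifs(profile,motifs):
--     # get consensus sequence
--     consensus=[]
--     for pA,pC,pG,pT in zip(profile[0],profile[1],profile[2],profile[3]):
--         pMax=max([pA,pT,pG,pC])
--         if pA==pMax:
--             consensus+=['A']
--         elif pC==pMax:
--             consensus+=['C']
--         elif pG==pMax:
--             consensus+=['G']
--         elif pT==pMax:
--             consensus+=['T']
--
--     # get score
--     score=0
--     for m in motifs:
--         for ntIdx in range(len(motifs[0])):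
--             if m[ntIdx] != consensus[ntIdx]:
--                 score+=1
--
--     return score
-- ===== SOURCE B (Python) =====
-- def scoreMotifs(profile, motifs):
--     # Count-and-subtract: tally (column, char) frequencies in one pass over the
--     # motifs, then score = width*len(motifs) minus the consensus-match counts,
--     # so the per-motif comparison scan against a consensus disappears.
--     counts = {}
--     for m in motifs:
--         for key in enumerate(m):
--             counts[key] = counts.get(key, 0) + 1
--     width = len(motifs[0]) if motifs else 0
--     score = width * len(motifs)
--     for i in range(width):
--         pA, pC, pG, pT = profile[0][i], profile[1][i], profile[2][i], profile[3][i]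
--         mx = max(pA, pT, pG, pC)
--         nt = 'A' if pA == mx else 'C' if pC == mx else 'G' if pG == mx else 'T'
--         score -= counts.get((i, nt), 0)
--     return score
-- ===== Notes on version B (the rewrite author's own statement) =====
-- stated objective: alternative
-- what changed: Replaced A's consensus-list-then-compare scan (build consensus via zip over profile rows, then compare every motif cell against it) by count-and-subtract: one pass tallies a (column,char) frequency dictionary over the motifs, then score = width*len(motifs) minus the per-column count of the consensus character, so the per-motif comparison scan disappears.
import Mathlib
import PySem

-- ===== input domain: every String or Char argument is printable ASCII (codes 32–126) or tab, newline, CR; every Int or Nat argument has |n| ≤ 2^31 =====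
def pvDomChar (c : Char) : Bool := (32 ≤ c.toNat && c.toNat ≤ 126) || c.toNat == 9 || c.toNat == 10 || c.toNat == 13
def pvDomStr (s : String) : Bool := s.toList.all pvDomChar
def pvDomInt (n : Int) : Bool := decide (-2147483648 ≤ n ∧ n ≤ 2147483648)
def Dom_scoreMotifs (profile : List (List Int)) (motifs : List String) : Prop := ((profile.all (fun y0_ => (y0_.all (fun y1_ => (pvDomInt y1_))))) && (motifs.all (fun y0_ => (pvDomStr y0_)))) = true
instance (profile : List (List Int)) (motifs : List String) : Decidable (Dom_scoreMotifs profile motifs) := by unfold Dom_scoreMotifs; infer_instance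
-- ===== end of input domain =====

-- B scores by count-and-subtract: it tallies a (column, char) frequency dictionary over the
-- motifs in one pass and returns width*len(motifs) minus the per-column consensus-match counts,
-- instead of A's consensus list followed by a motif-by-motif comparison scan (alternative, not faster).

-- ===== PORT A =====

-- zip(profile[0],profile[1],profile[2],profile[3]): truncates at the shortest row, as Python's zip
def pvZip4 : List Int → List Int → List Int → List Int → List (Int × Int × Int × Int)
  | a :: as, b :: bs, c :: cs, d :: ds => (a, b, c, d) :: pvZip4 as bs cs ds
  | _, _, _, _ => []

def scoreMotifs (profile : List (List Int)) (motifs : List String) : Int :=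
  -- profile[0..3]: Python raises IndexError when profile has fewer than 4 rows (excluded by Pre_)
  let p0 := profile.getD 0 []
  let p1 := profile.getD 1 []
  let p2 := profile.getD 2 []
  let p3 := profile.getD 3 []
  let consensus : List Char :=
    (pvZip4 p0 p1 p2 p3).foldl (fun acc q =>
      let pA := q.1
      let pC := q.2.1
      let pG := q.2.2.1
      let pT := q.2.2.2
      let pMax := ((pA ⊔ pT) ⊔ pG) ⊔ pC   -- max([pA,pT,pG,pC]), left to right
      if pA = pMax then acc ++ ['A']
      else if pC = pMax then acc ++ ['C']
      else if pG = pMax then acc ++ ['G']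
      else if pT = pMax then acc ++ ['T']
      else acc) []
  -- len(motifs[0]): evaluated only when the loop body runs; Pre_ keeps all indexing in range
  let L := (motifs.headD "").toList.length
  motifs.foldl (fun score m =>
    (List.range L).foldl (fun s i =>
      if m.toList.getD i ' ' ≠ consensus.getD i ' ' then s + 1 else s) score) 0

-- ===== PORT B =====

def scoreMotifs_alt (profile : List (List Int)) (motifs : List String) : Int :=
  -- counts[(i, ch)] = how many motifs carry character ch at column i
  let counts : PySem.Dict (Int × Char) Int :=
    motifs.foldl (fun d m =>
      (PySem.List.enumerate m.toList 0).foldl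
        (fun d key => d.insert key (d.getD key 0 + 1)) d)
      PySem.Dict.empty
  let width := (motifs.headD "").toList.length   -- len(motifs[0]) if motifs else 0
  let score0 : Int := (width : Int) * motifs.length
  (List.range width).foldl (fun score i =>
    let pA := (profile.getD 0 []).getD i 0
    let pC := (profile.getD 1 []).getD i 0
    let pG := (profile.getD 2 []).getD i 0
    let pT := (profile.getD 3 []).getD i 0
    let mx := ((pA ⊔ pT) ⊔ pG) ⊔ pC   -- max(pA, pT, pG, pC)
    let nt := if pA = mx then 'A' else if pC = mx then 'C' else if pG = mx then 'G' else 'T'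
    score - counts.getD ((i : Int), nt) 0) score0

-- ===== PRECONDITION & SPEC =====
-- Pre_ excludes exactly the inputs where Python A raises IndexError: a profile with fewer than
-- 4 rows, or a row of profile[0..3] or a motif shorter than len(motifs[0]).
def Pre_scoreMotifs (profile : List (List Int)) (motifs : List String) : Prop :=
  4 ≤ profile.length ∧
  (motifs.headD "").toList.length ≤ (profile.getD 0 []).length ∧
  (motifs.headD "").toList.length ≤ (profile.getD 1 []).length ∧
  (motifs.headD "").toList.length ≤ (profile.getD 2 []).length ∧
  (motifs.headD "").toList.length ≤ (profile.getD 3 []).length ∧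
  (∀ m ∈ motifs, (motifs.headD "").toList.length ≤ m.toList.length)
instance (profile : List (List Int)) (motifs : List String) : Decidable (Pre_scoreMotifs profile motifs) := by unfold Pre_scoreMotifs; infer_instance

def pvWitness_scoreMotifs : List (List Int) × List String :=
  ([[1, 0], [0, 2], [0, 0], [0, 0]], ["AC", "GC", "AT"])

def Spec_scoreMotifs (profile : List (List Int)) (motifs : List String) (out : Int) : Prop := out = scoreMotifs_alt profile motifs
instance (profile : List (List Int)) (motifs : List String) (out : Int) : Decidable (Spec_scoreMotifs profile motifs out) := by unfold Spec_scoreMotifs; infer_instance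

-- ===== CLAIM (what is proved, stated in full; the proofs are below) =====
def Claim_equal_scoreMotifs : Prop := ∀ (profile : List (List Int)) (motifs : List String), Dom_scoreMotifs profile motifs → Pre_scoreMotifs profile motifs → Spec_scoreMotifs profile motifs (scoreMotifs profile motifs)

-- ===== LEMMAS AND PROOFS =====

-- the per-column consensus character of A (reachable branches of A's fold)
def pvCharA (q : Int × Int × Int × Int) : Char :=
  let pMax := ((q.1 ⊔ q.2.2.2) ⊔ q.2.2.1) ⊔ q.2.1
  if q.1 = pMax then 'A'
  else if q.2.1 = pMax then 'C'
  else if q.2.2.1 = pMax then 'G'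
  else 'T'

theorem pv_consA_eq (l : List (Int × Int × Int × Int)) : ∀ (acc : List Char),
    l.foldl (fun acc q =>
      let pA := q.1
      let pC := q.2.1
      let pG := q.2.2.1
      let pT := q.2.2.2
      let pMax := ((pA ⊔ pT) ⊔ pG) ⊔ pC
      if pA = pMax then acc ++ ['A']
      else if pC = pMax then acc ++ ['C']
      else if pG = pMax then acc ++ ['G']
      else if pT = pMax then acc ++ ['T']
      else acc) acc = acc ++ l.map pvCharA := by
  induction l with
  | nil => simp
  | cons q t ih =>
    intro acc
    simp only [List.foldl_cons, List.map_cons]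
    rw [ih]
    obtain ⟨a, c, g, d⟩ := q
    simp only [pvCharA]
    split_ifs with h1 h2 h3 h4
    · simp
    · simp
    · simp
    · simp
    · exfalso; omega

theorem pv_mapCharA_getD : ∀ (as bs cs ds : List Int) (i : ℕ),
    i < as.length → i < bs.length → i < cs.length → i < ds.length →
    ((pvZip4 as bs cs ds).map pvCharA).getD i ' '
      = pvCharA (as.getD i 0, bs.getD i 0, cs.getD i 0, ds.getD i 0) := by
  intro as
  induction as with
  | nil => intro bs cs ds i h; simp at h
  | cons a as ih =>
    intro bs cs ds i ha hb hc hd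
    cases bs with
    | nil => simp at hb
    | cons b bs =>
      cases cs with
      | nil => simp at hc
      | cons c cs =>
        cases ds with
        | nil => simp at hd
        | cons d ds =>
          cases i with
          | zero => simp [pvZip4]
          | succ n =>
            simp only [pvZip4, List.map_cons, List.getD_cons_succ]
            exact ih bs cs ds n (by simpa using ha) (by simpa using hb)
              (by simpa using hc) (by simpa using hd)

-- a foldl that conditionally adds one equals the start plus a sum of indicators
theorem pv_foldl_ind {α : Type} (p : α → Prop) [DecidablePred p] (l : List α) :
    ∀ (a : Int), l.foldl (fun s x => if p x then s + 1 else s) a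
      = a + (l.map (fun x => if p x then (1 : Int) else 0)).sum := by
  induction l with
  | nil => simp
  | cons x t ih =>
    intro a
    simp only [List.foldl_cons, List.map_cons, List.sum_cons, ih]
    split_ifs <;> ring

-- a foldl that adds g x equals the start plus the sum of g
theorem pv_foldl_sum {α : Type} (g : α → Int) (l : List α) :
    ∀ (a : Int), l.foldl (fun s x => s + g x) a = a + (l.map g).sum := by
  induction l with
  | nil => simp
  | cons x t ih => intro a; simp only [List.foldl_cons, List.map_cons, List.sum_cons, ih]; ring

-- a foldl that subtracts g x equals the start minus the sum of g
theorem pv_foldl_sub {α : Type} (g : α → Int) (l : List α) :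
    ∀ (a : Int), l.foldl (fun s x => s - g x) a = a - (l.map g).sum := by
  induction l with
  | nil => simp
  | cons x t ih => intro a; simp only [List.foldl_cons, List.map_cons, List.sum_cons, ih]; ring

theorem pv_sum_map_add {α : Type} (f g : α → Int) (l : List α) :
    (l.map (fun x => f x + g x)).sum = (l.map f).sum + (l.map g).sum := by
  induction l with
  | nil => simp
  | cons x t ih => simp only [List.map_cons, List.sum_cons, ih]; ring

theorem pv_sum_swap {α β : Type} (F : α → β → Int) (xs : List α) (ys : List β) :
    (xs.map (fun x => (ys.map (F x)).sum)).sum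
      = (ys.map (fun y => (xs.map (fun x => F x y)).sum)).sum := by
  induction xs with
  | nil => simp [List.map_const']
  | cons x t ih =>
    simp only [List.map_cons, List.sum_cons, ih]
    rw [← pv_sum_map_add]

-- nested increment folds over the motifs equal one flattened counter
theorem pv_foldl_flat {α β : Type} (f : α → List β)
    (g : PySem.Dict β Int → β → PySem.Dict β Int) (l : List α) :
    ∀ (d : PySem.Dict β Int),
      l.foldl (fun d x => (f x).foldl g d) d = (l.flatMap f).foldl g d := by
  induction l with
  | nil => simp
  | cons x t ih => intro d; simp [List.foldl_append, ih]

-- elements of enumerate xs s have first component ≥ s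
theorem pv_enum_count_lt (xs : List Char) (s i : Int) (c : Char) (h : i < s) :
    (PySem.List.enumerate xs s).count (i, c) = 0 := by
  rw [List.count_eq_zero]
  intro hmem
  obtain ⟨k, hk, hp⟩ := (PySem.List.mem_enumerate_iff _ _ _).mp hmem
  have : i = s + k := congrArg Prod.fst hp
  omega

-- how often does (s + j, c) occur in enumerate xs s?
theorem pv_enum_count : ∀ (xs : List Char) (s : Int) (j : ℕ) (c : Char),
    (PySem.List.enumerate xs s).count ((s + j : Int), c)
      = if j < xs.length ∧ xs.getD j ' ' = c then 1 else 0 := by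
  intro xs
  induction xs with
  | nil => intro s j c; simp [PySem.List.enumerate_nil]
  | cons x t ih =>
    intro s j c
    rw [PySem.List.enumerate_cons]
    cases j with
    | zero =>
      simp only [Nat.cast_zero, add_zero]
      rw [List.count_cons, pv_enum_count_lt t (s + 1) s c (by omega)]
      by_cases hc : x = c
      · subst hc; simp
      · simp [hc, Prod.ext_iff]
    | succ n =>
      rw [List.count_cons]
      push_cast
      have h1 : ¬ ((s, x) = ((s + (↑n + 1) : Int), c)) := by
        intro h; have := congrArg Prod.fst h; simp at this; omega
      have h2 : (s + (↑n + 1) : Int) = (s + 1) + (n : Int) := by ring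
      rw [h2, ih (s + 1) n c]
      simp
      intro hq
      exfalso
      omega

-- count of a key in the concatenation = sum of counts
theorem pv_count_flatMap {α β : Type} [BEq β] (f : α → List β) (l : List α) (b : β) :
    (l.flatMap f).count b = ((l.map (fun x => ((f x).count b : Int))).sum).toNat ∧
    (0 : Int) ≤ (l.map (fun x => ((f x).count b : Int))).sum := by
  induction l with
  | nil => simp
  | cons x t ih =>
    obtain ⟨ih1, ih2⟩ := ih
    constructor
    · simp only [List.flatMap_cons, List.count_append, List.map_cons, List.sum_cons, ih1]
      omega
    · simp only [List.map_cons, List.sum_cons]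
      positivity

-- ===== VERDICT (by name: the statement is the Claim_ definition above) =====
set_option maxHeartbeats 1000000 in
theorem scoreMotifs_spec : Claim_equal_scoreMotifs := by
  intro profile motifs _ hpre
  obtain ⟨hlen, h0, h1, h2, h3, hm⟩ := hpre
  unfold Spec_scoreMotifs scoreMotifs scoreMotifs_alt
  simp only []
  set p0 := profile.getD 0 [] with hp0
  set p1 := profile.getD 1 [] with hp1
  set p2 := profile.getD 2 [] with hp2
  set p3 := profile.getD 3 [] with hp3
  set L := (motifs.headD "").toList.length with hL
  rw [pv_consA_eq]
  simp only [List.nil_append]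
  -- B's dictionary is the counter of the flattened enumerations
  rw [pv_foldl_flat (fun m => PySem.List.enumerate m.toList 0)
      (fun d key => d.insert key (d.getD key 0 + 1)) motifs PySem.Dict.empty]
  rw [PySem.Dict.foldl_insert_getD_add_one_eq_counter]
  -- A as a double sum of mismatch indicators
  have hA : motifs.foldl (fun score m =>
      (List.range L).foldl (fun s i =>
        if m.toList.getD i ' ' ≠ ((pvZip4 p0 p1 p2 p3).map pvCharA).getD i ' ' then s + 1 else s) score) 0
      = (motifs.map (fun m => ((List.range L).map (fun i =>
          if m.toList.getD i ' ' ≠ ((pvZip4 p0 p1 p2 p3).map pvCharA).getD i ' ' then (1 : Int) else 0)).sum)).sum := by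
    have hfun : (fun score m =>
        (List.range L).foldl (fun s i =>
          if m.toList.getD i ' ' ≠ ((pvZip4 p0 p1 p2 p3).map pvCharA).getD i ' ' then s + 1 else s) score)
        = (fun (score : Int) (m : String) => score + ((List.range L).map (fun i =>
          if m.toList.getD i ' ' ≠ ((pvZip4 p0 p1 p2 p3).map pvCharA).getD i ' ' then (1 : Int) else 0)).sum) := by
      funext score m
      exact pv_foldl_ind _ _ _
    rw [hfun, pv_foldl_sum]
    simp
  -- B as base minus the sum of per-column match counts (defeq: pvCharA is the inlined if-chain)
  have hB : (List.range L).foldl (fun (score : Int) (i : ℕ) =>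
      score - (PySem.Dict.counter (motifs.flatMap (fun m => PySem.List.enumerate m.toList 0))).getD
        ((i : Int), pvCharA (p0.getD i 0, p1.getD i 0, p2.getD i 0, p3.getD i 0)) 0)
      ((L : Int) * motifs.length)
      = ((L : Int) * motifs.length)
        - ((List.range L).map (fun (i : ℕ) =>
            (PySem.Dict.counter (motifs.flatMap (fun m => PySem.List.enumerate m.toList 0))).getD
              ((i : Int), pvCharA (p0.getD i 0, p1.getD i 0, p2.getD i 0, p3.getD i 0)) 0)).sum :=
    pv_foldl_sub _ _ _
  refine hA.trans (Eq.trans ?_ hB.symm)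
  rw [pv_sum_swap]
  -- column by column: mismatches = n - matches
  have hcol : ∀ i ∈ List.range L,
      (motifs.map (fun m =>
        if m.toList.getD i ' ' ≠ ((pvZip4 p0 p1 p2 p3).map pvCharA).getD i ' ' then (1 : Int) else 0)).sum
      = (motifs.length : Int)
        - (PySem.Dict.counter (motifs.flatMap (fun m => PySem.List.enumerate m.toList 0))).getD
            ((i : Int), pvCharA (p0.getD i 0, p1.getD i 0, p2.getD i 0, p3.getD i 0)) 0 := by
    intro i hi
    clear hA hB
    have hiL : i < L := List.mem_range.mp hi
    rw [pv_mapCharA_getD p0 p1 p2 p3 i (lt_of_lt_of_le hiL h0) (lt_of_lt_of_le hiL h1)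
      (lt_of_lt_of_le hiL h2) (lt_of_lt_of_le hiL h3)]
    set nt := pvCharA (p0.getD i 0, p1.getD i 0, p2.getD i 0, p3.getD i 0) with hntc
    rw [PySem.Dict.getD_counter]
    obtain ⟨hcnt, _⟩ := pv_count_flatMap (fun m => PySem.List.enumerate m.toList 0) motifs
      ((i : Int), nt)
    have hpt : ∀ m ∈ motifs,
        ((PySem.List.enumerate m.toList 0).count ((i : Int), nt) : Int)
          = if m.toList.getD i ' ' = nt then (1 : Int) else 0 := by
      intro m hmem
      have him : i < m.toList.length := lt_of_lt_of_le hiL (hm m hmem)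
      have him' : i < m.length := by simpa using him
      have hz : ((i : Int)) = (0 : Int) + (i : ℕ) := by ring
      rw [hz, pv_enum_count m.toList 0 i nt]
      simp [him']
    have hsum_eq : (motifs.map (fun m => ((PySem.List.enumerate m.toList 0).count ((i : Int), nt) : Int))).sum
        = (motifs.map (fun m => if m.toList.getD i ' ' = nt then (1 : Int) else 0)).sum := by
      apply congrArg
      exact List.map_congr_left hpt
    have hflat : ((motifs.flatMap (fun m => PySem.List.enumerate m.toList 0)).count ((i : Int), nt) : Int)
        = (motifs.map (fun m => if m.toList.getD i ' ' = nt then (1 : Int) else 0)).sum := by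
      rw [← hsum_eq]
      omega
    rw [hflat]
    -- per motif: mismatch + match = 1
    have hone : (motifs.map (fun m => if m.toList.getD i ' ' ≠ nt then (1 : Int) else 0)).sum
         + (motifs.map (fun m => if m.toList.getD i ' ' = nt then (1 : Int) else 0)).sum
         = (motifs.length : Int) := by
      rw [← pv_sum_map_add]
      have hmap : (motifs.map (fun m =>
          (if m.toList.getD i ' ' ≠ nt then (1 : Int) else 0)
          + (if m.toList.getD i ' ' = nt then (1 : Int) else 0)))
          = motifs.map (fun _ => (1 : Int)) := by
        apply List.map_congr_left
        intro m _
        split_ifs <;> simp_all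
      rw [hmap]
      rw [List.map_const', List.sum_replicate]
      simp
    omega
  rw [List.map_congr_left hcol]
  have hsub : ∀ (f : ℕ → Int),
      ((List.range L).map (fun i => (motifs.length : Int) - f i)).sum
        = (L : Int) * motifs.length - ((List.range L).map f).sum := by
    intro f
    have : ∀ (l : List ℕ), (l.map (fun i => (motifs.length : Int) - f i)).sum
        = (l.length : Int) * motifs.length - (l.map f).sum := by
      intro l
      induction l with
      | nil => simp
      | cons x t ih =>
        simp only [List.map_cons, List.sum_cons, ih, List.length_cons]
        push_cast
        ring
    simpa using this (List.range L)
  exact hsub _
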